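-- pv_equiv track=rewrite | github.com/eternal-sunshine-0829/myproject | project2.py | zigzag_indices
-- ===== SOURCE A (Python) =====
-- def zigzag_indices(n=8):
--     #返回8x8的zigzag索引
--     idxs = []
--     for s in range(2 * n - 1):
--         if s % 2 == 0:
--             for i in range(s + 1):
--                 j = s - i
--                 if i < n and j < n:
--                     idxs.append((i, j))
--         else:
--             for i in range(s, -1, -1):
--                 j = s - i
--                 if i < n and j < n:
--                     idxs.append((i, j))
--     return idxs
-- ===== SOURCE B (Python) =====
-- def zigzag_indices(n=8):
--     cells = [(i, j) for i in range(n) for j in range(n)]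
--     cells.sort(key=lambda c: (c[0] + c[1], c[0] if (c[0] + c[1]) % 2 == 0 else -c[0]))
--     return cells
-- ===== Notes on version B (the rewrite author's own statement) =====
-- stated objective: alternative
-- what changed: B replaces A's manual diagonal walk (alternating ascending/descending index loops with in-loop bounds filtering) by building all n*n coordinate pairs and sorting them once by the zigzag key (i+j, i if (i+j) even else -i).
import Mathlib
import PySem

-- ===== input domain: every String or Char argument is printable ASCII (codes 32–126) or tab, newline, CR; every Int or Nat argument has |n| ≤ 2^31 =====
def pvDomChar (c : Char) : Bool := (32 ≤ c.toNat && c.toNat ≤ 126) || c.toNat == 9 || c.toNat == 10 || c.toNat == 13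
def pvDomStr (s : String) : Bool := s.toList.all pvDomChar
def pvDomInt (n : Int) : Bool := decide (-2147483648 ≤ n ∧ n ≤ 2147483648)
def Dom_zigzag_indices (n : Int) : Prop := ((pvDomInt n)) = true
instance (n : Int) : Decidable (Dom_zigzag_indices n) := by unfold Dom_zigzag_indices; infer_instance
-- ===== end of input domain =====

-- B builds all n*n coordinate pairs and sorts them once by the zigzag key instead of A's manual diagonal walk (alternative decomposition, same result).

-- ===== PORT A =====
def zigzag_indices (n : Int) : List (Int × Int) :=
  let idxs : List (Int × Int) := []
  (PySem.List.pyRange 0 (2 * n - 1) 1).foldl (fun idxs s =>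
    if PySem.Int.mod s 2 = 0 then
      (PySem.List.pyRange 0 (s + 1) 1).foldl (fun idxs i =>
        let j := s - i
        if i < n ∧ j < n then idxs ++ [(i, j)] else idxs) idxs
    else
      (PySem.List.pyRange s (-1) (-1)).foldl (fun idxs i =>
        let j := s - i
        if i < n ∧ j < n then idxs ++ [(i, j)] else idxs) idxs) idxs

-- ===== PORT B =====
def zigzag_indices_alt (n : Int) : List (Int × Int) :=
  let cells := (PySem.List.pyRange 0 n 1).flatMap (fun i =>
    (PySem.List.pyRange 0 n 1).map (fun j => (i, j)))
  PySem.List.sorted2 cells (fun c => c.1 + c.2)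
    (fun c => if PySem.Int.mod (c.1 + c.2) 2 = 0 then c.1 else -c.1)

-- ===== PRECONDITION & SPEC =====
def Spec_zigzag_indices (n : Int) (out : List (Int × Int)) : Prop := out = zigzag_indices_alt n
instance (n : Int) (out : List (Int × Int)) : Decidable (Spec_zigzag_indices n out) := by unfold Spec_zigzag_indices; infer_instance

-- ===== CLAIM (what is proved, stated in full; the proofs are below) =====
def Claim_equal_zigzag_indices : Prop := ∀ (n : Int), Dom_zigzag_indices n → Spec_zigzag_indices n (zigzag_indices n)

-- ===== LEMMAS AND PROOFS =====

-- the zigzag sort key as a lexicographic value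
def zzKey (c : Int × Int) : Lex (Int × Int) :=
  toLex (c.1 + c.2, if PySem.Int.mod (c.1 + c.2) 2 = 0 then c.1 else -c.1)

-- the ascending-i segment of anti-diagonal s that lies inside the n×n grid
def zzRow (n s : Int) : List (Int × Int) :=
  (PySem.List.pyRange (max 0 (s - n + 1)) (min (s + 1) n) 1).map (fun i => (i, s - i))

def zzDiag (n s : Int) : List (Int × Int) :=
  if PySem.Int.mod s 2 = 0 then zzRow n s else (zzRow n s).reverse

-- sorted2 with Int keys is sorted with the lexicographic product key
lemma sorted2_eq_sorted_lex {α : Type} (xs : List α) (k1 k2 : α → Int) :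
    PySem.List.sorted2 xs k1 k2 false =
    PySem.List.sorted xs (fun x => toLex (k1 x, k2 x)) false := by
  show List.foldl (fun acc x => PySem.List.insertBy _ x acc) [] xs
     = List.foldl (fun acc x => PySem.List.insertBy _ x acc) [] xs
  have hb : (fun a b => decide (k1 a < k1 b) || (!decide (k1 b < k1 a) && decide (k2 a < k2 b)))
      = fun a b => decide (toLex (k1 a, k2 a) < toLex (k1 b, k2 b)) := by
    funext a b
    by_cases h1 : k1 a < k1 b
    · simp [h1, Prod.Lex.toLex_lt_toLex]
    · by_cases h2 : k1 b < k1 a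
      · simp only [h1, h2, decide_true, decide_false, Bool.not_true, Bool.false_and,
          Bool.false_or, Prod.Lex.toLex_lt_toLex]
        symm
        simp only [decide_eq_false_iff_not]
        rintro (hc | ⟨he, -⟩)
        · exact hc
        · omega
      · have he : k1 a = k1 b := le_antisymm (not_lt.mp h2) (not_lt.mp h1)
        simp [h1, h2, he, Prod.Lex.toLex_lt_toLex]
  rw [hb]

-- a bounds filter over a unit-step range is the clipped range
lemma filter_pyRange_band (a b lo hi : Int) :
    (PySem.List.pyRange a b 1).filter (fun i => decide (lo ≤ i ∧ i < hi)) =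
    PySem.List.pyRange (max a lo) (min b hi) 1 := by
  by_cases hab : b ≤ a
  · rw [PySem.List.pyRange_one_eq_nil hab, PySem.List.pyRange_one_eq_nil (by omega)]
    rfl
  · push Not at hab
    rw [PySem.List.pyRange_one_cons hab]
    have ih := filter_pyRange_band (a + 1) b lo hi
    by_cases hp : lo ≤ a ∧ a < hi
    · rw [List.filter_cons_of_pos (by simpa using hp), ih]
      have h1 : max (a + 1) lo = max a lo + 1 := by omega
      have h2 : max a lo < min b hi := by omega
      rw [h1, PySem.List.pyRange_one_cons h2]
      congr 1
      omega
    · rw [List.filter_cons_of_neg (by simpa using hp), ih]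
      rcases not_and_or.mp hp with h | h
      · push Not at h
        congr 1
        omega
      · push Not at h
        rw [PySem.List.pyRange_one_eq_nil (by omega), PySem.List.pyRange_one_eq_nil (by omega)]
termination_by (b - a).toNat
decreasing_by omega

-- A's ascending inner loop appends exactly zzRow n s
lemma inner_asc (n s : Int) (init : List (Int × Int)) :
    (PySem.List.pyRange 0 (s + 1) 1).foldl (fun idxs i =>
        if i < n ∧ s - i < n then idxs ++ [(i, s - i)] else idxs) init
      = init ++ zzRow n s := by
  have := PySem.List.foldl_append_if (fun i => decide (i < n ∧ s - i < n))
    (fun i => ((i : Int), s - i)) (PySem.List.pyRange 0 (s + 1) 1) init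
  simp only [decide_eq_true_eq] at this
  rw [this]
  have hcong : (PySem.List.pyRange 0 (s + 1) 1).filter (fun i => decide (i < n ∧ s - i < n))
      = (PySem.List.pyRange 0 (s + 1) 1).filter (fun i => decide (s - n + 1 ≤ i ∧ i < n)) := by
    apply List.filter_congr
    intro i _
    simp only [decide_eq_decide]
    omega
  rw [hcong, filter_pyRange_band]
  rfl

-- A's descending inner loop appends exactly (zzRow n s).reverse
lemma inner_desc (n s : Int) (init : List (Int × Int)) :
    (PySem.List.pyRange s (-1) (-1)).foldl (fun idxs i =>
        if i < n ∧ s - i < n then idxs ++ [(i, s - i)] else idxs) init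
      = init ++ (zzRow n s).reverse := by
  rw [PySem.List.pyRange_neg_one_eq_reverse]
  have heq : ((-1 : Int) + 1) = 0 := by norm_num
  rw [heq]
  have := PySem.List.foldl_append_if (fun i => decide (i < n ∧ s - i < n))
    (fun i => ((i : Int), s - i)) (PySem.List.pyRange 0 (s + 1) 1).reverse init
  simp only [decide_eq_true_eq] at this
  rw [this, List.filter_reverse, List.map_reverse]
  congr 1
  have hcong : (PySem.List.pyRange 0 (s + 1) 1).filter (fun i => decide (i < n ∧ s - i < n))
      = (PySem.List.pyRange 0 (s + 1) 1).filter (fun i => decide (s - n + 1 ≤ i ∧ i < n)) := by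
    apply List.filter_congr
    intro i _
    simp only [decide_eq_decide]
    omega
  rw [hcong, filter_pyRange_band]
  rfl

-- A's result is the concatenation of the (alternating) diagonals
lemma zigzag_eq_flatMap (n : Int) :
    zigzag_indices n = (PySem.List.pyRange 0 (2 * n - 1) 1).flatMap (zzDiag n) := by
  show (PySem.List.pyRange 0 (2 * n - 1) 1).foldl _ [] = _
  have hfun : (fun (idxs : List (Int × Int)) s =>
      if PySem.Int.mod s 2 = 0 then
        (PySem.List.pyRange 0 (s + 1) 1).foldl (fun idxs i =>
          let j := s - i
          if i < n ∧ j < n then idxs ++ [(i, j)] else idxs) idxs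
      else
        (PySem.List.pyRange s (-1) (-1)).foldl (fun idxs i =>
          let j := s - i
          if i < n ∧ j < n then idxs ++ [(i, j)] else idxs) idxs)
      = fun idxs s => idxs ++ zzDiag n s := by
    funext idxs s
    unfold zzDiag
    split_ifs with h
    · exact inner_asc n s idxs
    · exact inner_desc n s idxs
  rw [hfun, PySem.List.foldl_append_eq_flatMap]
  rfl

lemma mem_zzDiag {n s : Int} {c : Int × Int} :
    c ∈ zzDiag n s ↔ c.1 + c.2 = s ∧ 0 ≤ c.1 ∧ c.1 < n ∧ 0 ≤ c.2 ∧ c.2 < n := by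
  unfold zzDiag zzRow
  have : ∀ (l : List Int), c ∈ l.map (fun i => ((i : Int), s - i)) ↔ c.1 + c.2 = s ∧ c.1 ∈ l := by
    intro l
    simp only [List.mem_map]
    constructor
    · rintro ⟨i, hi, rfl⟩; exact ⟨by ring, hi⟩
    · rintro ⟨hsum, hmem⟩; exact ⟨c.1, hmem, by obtain ⟨x, y⟩ := c; simp at hsum ⊢; omega⟩
  split_ifs <;>
    simp only [List.mem_reverse, this, PySem.List.mem_pyRange_one] <;> omega

-- the diagonal is strictly increasing in the zigzag key
lemma pairwise_zzDiag (n s : Int) :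
    (zzDiag n s).Pairwise (fun a b => zzKey a < zzKey b) := by
  unfold zzDiag zzRow
  have hpw := PySem.List.pairwise_lt_pyRange_one (max 0 (s - n + 1)) (min (s + 1) n)
  rcases PySem.Int.mod_two_eq s with h | h
  · rw [if_pos h]
    refine List.Pairwise.map _ ?_ hpw
    intro i i' hlt
    have hs : i + (s - i) = s := by ring
    have hs' : i' + (s - i') = s := by ring
    simp only [zzKey, Prod.Lex.toLex_lt_toLex, hs, hs', h, if_pos]
    exact Or.inr ⟨trivial, hlt⟩
  · rw [if_neg (by omega), List.pairwise_reverse]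
    refine List.Pairwise.map _ ?_ hpw
    intro i i' hlt
    have hs : i + (s - i) = s := by ring
    have hs' : i' + (s - i') = s := by ring
    have hne : ¬ PySem.Int.mod s 2 = 0 := by omega
    simp only [zzKey, Prod.Lex.toLex_lt_toLex, hs, hs', if_neg hne]
    refine Or.inr ⟨trivial, by omega⟩

-- the full concatenation is strictly increasing in the zigzag key
lemma pairwise_zigzag (n : Int) :
    ((PySem.List.pyRange 0 (2 * n - 1) 1).flatMap (zzDiag n)).Pairwise
      (fun a b => zzKey a < zzKey b) := by
  rw [List.pairwise_flatMap]
  refine ⟨fun s _ => pairwise_zzDiag n s, ?_⟩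
  refine (PySem.List.pairwise_lt_pyRange_one 0 (2 * n - 1)).imp ?_
  intro s s' hlt x hx y hy
  have hxs := (mem_zzDiag.mp hx).1
  have hys := (mem_zzDiag.mp hy).1
  simp only [zzKey, Prod.Lex.toLex_lt_toLex, hxs, hys]
  omega

lemma nodup_of_pairwise_key {l : List (Int × Int)} (h : l.Pairwise (fun a b => zzKey a < zzKey b)) :
    l.Nodup :=
  h.imp (fun {a b} hab hne => by rw [hne] at hab; exact lt_irrefl _ hab)

-- the row-major grid list, B's starting point
lemma mem_cells {n : Int} {c : Int × Int} :
    c ∈ (PySem.List.pyRange 0 n 1).flatMap (fun i => (PySem.List.pyRange 0 n 1).map (fun j => ((i : Int), j)))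
    ↔ 0 ≤ c.1 ∧ c.1 < n ∧ 0 ≤ c.2 ∧ c.2 < n := by
  obtain ⟨x, y⟩ := c
  simp only [List.mem_flatMap, List.mem_map, PySem.List.mem_pyRange_one, Prod.mk.injEq]
  constructor
  · rintro ⟨i, hi, j, hj, rfl, rfl⟩; exact ⟨hi.1, hi.2, hj.1, hj.2⟩
  · rintro ⟨h1, h2, h3, h4⟩; exact ⟨x, ⟨h1, h2⟩, y, ⟨h3, h4⟩, rfl, rfl⟩

lemma nodup_cells (n : Int) :
    ((PySem.List.pyRange 0 n 1).flatMap (fun i =>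
      (PySem.List.pyRange 0 n 1).map (fun j => ((i : Int), j)))).Nodup := by
  rw [List.nodup_flatMap]
  constructor
  · intro i _
    exact (PySem.List.nodup_pyRange_one 0 n).map (fun a b h => by simpa using h)
  · refine (PySem.List.pairwise_lt_pyRange_one 0 n).imp ?_
    intro i i' hlt
    simp only [Function.onFun, List.disjoint_left, List.mem_map]
    rintro c ⟨j, _, rfl⟩ ⟨j', _, h⟩
    have : i' = i := by simpa using congrArg Prod.fst h
    omega

lemma zigzag_perm_cells (n : Int) :
    ((PySem.List.pyRange 0 (2 * n - 1) 1).flatMap (zzDiag n)).Perm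
      ((PySem.List.pyRange 0 n 1).flatMap (fun i =>
        (PySem.List.pyRange 0 n 1).map (fun j => ((i : Int), j)))) := by
  rw [List.perm_ext_iff_of_nodup (nodup_of_pairwise_key (pairwise_zigzag n)) (nodup_cells n)]
  intro c
  rw [mem_cells, List.mem_flatMap]
  constructor
  · rintro ⟨s, _, hc⟩
    have := mem_zzDiag.mp hc
    omega
  · rintro ⟨h1, h2, h3, h4⟩
    exact ⟨c.1 + c.2, by rw [PySem.List.mem_pyRange_one]; omega,
      mem_zzDiag.mpr ⟨rfl, h1, h2, h3, h4⟩⟩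

-- ===== VERDICT (by name: the statement is the Claim_ definition above) =====
theorem zigzag_indices_spec : Claim_equal_zigzag_indices := by
  intro n _
  show zigzag_indices n = zigzag_indices_alt n
  rw [zigzag_eq_flatMap]
  unfold zigzag_indices_alt
  rw [sorted2_eq_sorted_lex]
  exact (PySem.List.sorted_eq_of_perm_of_pairwise_lt _ _ zzKey
    (zigzag_perm_cells n) (pairwise_zigzag n)).symm
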